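-- pv_equiv track=rewrite | github.com/opencv/opencv | modules/ts/misc/trace_profiler.py | getCXXFunctionName
-- ===== SOURCE A (Python) =====
-- def getCXXFunctionName(spec):
--     def dropParams(spec):
--         pos = len(spec) - 1
--         depth = 0
--         while pos >= 0:
--             if spec[pos] == ')':
--                 depth = depth + 1
--             elif spec[pos] == '(':
--                 depth = depth - 1
--                 if depth == 0:
--                     if pos == 0 or spec[pos - 1] in ['#', ':']:
--                         res = dropParams(spec[pos+1:-1])
--                         return (spec[:pos] + res[0], res[1])
--                     return (spec[:pos], spec[pos:])
--             pos = pos - 1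
--         return (spec, '')
--
--     def extractName(spec):
--         pos = len(spec) - 1
--         inName = False
--         while pos >= 0:
--             if spec[pos] == ' ':
--                 if inName:
--                     return spec[pos+1:]
--             elif spec[pos].isalnum():
--                 inName = True
--             pos = pos - 1
--         return spec
--
--     if spec.startswith('IPP') or spec.startswith('OpenCL'):
--         prefix_size = len('IPP') if spec.startswith('IPP') else len('OpenCL')
--         prefix = spec[:prefix_size]
--         if prefix_size < len(spec) and spec[prefix_size] in ['#', ':']:
--             prefix = prefix + spec[prefix_size]
--             prefix_size = prefix_size + 1
--         begin = prefix_size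
--         while begin < len(spec):
--             if spec[begin].isalnum() or spec[begin] in ['_', ':']:
--                 break
--             begin = begin + 1
--         if begin == len(spec):
--             return spec
--         end = begin
--         while end < len(spec):
--             if not (spec[end].isalnum() or spec[end] in ['_', ':']):
--                 break
--             end = end + 1
--         return prefix + spec[begin:end]
--
--     spec = spec.replace(') const', ')') # const methods
--     (ret_type_name, params) = dropParams(spec)
--     name = extractName(ret_type_name)
--     if 'operator' in name:
--         return name + params
--     if name.startswith('&'):
--         return name[1:]
--     return name
-- ===== SOURCE B (Python) =====
-- def getCXXFunctionName(spec):
--     def findOpen(s):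
--         # index of the '(' opening the trailing parenthesised group: the last
--         # position i with s[i] == '(' whose suffix s[i:] has balanced paren
--         # counts, located by one forward pass against the total balance.
--         total = s.count('(') - s.count(')')
--         bal = 0
--         best = None
--         i = 0
--         for c in s:
--             if c == '(':
--                 if bal == total:
--                     best = i
--                 bal += 1
--             elif c == ')':
--                 bal -= 1
--             i += 1
--         return best
--
--     def dropParams(s):
--         acc = ''
--         while True:
--             pos = findOpen(s)
--             if pos is None:
--                 return (acc + s, '')
--             if pos == 0 or s[pos - 1] in '#:':
--                 acc += s[:pos]
--                 s = s[pos + 1:-1]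
--             else:
--                 return (acc + s[:pos], s[pos:])
--
--     def dropWhile(pred, s):
--         i = 0
--         while i < len(s) and pred(s[i]):
--             i += 1
--         return s[i:]
--
--     def takeWhile(pred, s):
--         i = 0
--         while i < len(s) and pred(s[i]):
--             i += 1
--         return s[:i]
--
--     def extractName(s):
--         t = dropWhile(lambda c: not c.isalnum(), s[::-1])
--         if not t:
--             return s
--         u = dropWhile(lambda c: c != ' ', t)
--         return s[len(u):]
--
--     ident = lambda c: c.isalnum() or c in '_:'
--
--     if spec.startswith('IPP') or spec.startswith('OpenCL'):
--         n = 3 if spec.startswith('IPP') else 6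
--         if spec[n:n+1] in ('#', ':'):
--             n += 1
--         t = dropWhile(lambda c: not ident(c), spec[n:])
--         if not t:
--             return spec
--         return spec[:n] + takeWhile(ident, t)
--
--     spec = spec.replace(') const', ')')
--     ret_type_name, params = dropParams(spec)
--     name = extractName(ret_type_name)
--     if 'operator' in name:
--         return name + params
--     return name[1:] if name[:1] == '&' else name
-- ===== Notes on version B (the rewrite author's own statement) =====
-- stated objective: alternative
-- what changed: dropParams's recursive right-to-left depth scan becomes an iterative accumulator loop around a forward two-pass findOpen (the last '(' whose prefix balance equals the string's total paren balance), extractName's flagged index scan becomes reverse plus two dropWhile passes, and the IPP/OpenCL identifier index scans become dropWhile/takeWhile over the suffix.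
import Mathlib
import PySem

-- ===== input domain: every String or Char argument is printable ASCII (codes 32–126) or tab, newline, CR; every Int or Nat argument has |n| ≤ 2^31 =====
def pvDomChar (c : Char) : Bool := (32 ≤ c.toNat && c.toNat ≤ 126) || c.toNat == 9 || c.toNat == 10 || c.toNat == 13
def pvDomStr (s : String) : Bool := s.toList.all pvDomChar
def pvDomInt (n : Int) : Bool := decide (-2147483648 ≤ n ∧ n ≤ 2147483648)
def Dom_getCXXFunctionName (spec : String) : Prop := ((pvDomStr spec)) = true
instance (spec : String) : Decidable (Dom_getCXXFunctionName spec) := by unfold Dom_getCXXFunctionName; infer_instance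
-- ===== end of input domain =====

-- B re-implements A with the same observable behaviour: dropParams's recursive right-to-left
-- depth scan becomes an iterative accumulator loop around a FORWARD two-pass findOpen (last '('
-- whose prefix balance equals the total paren balance), extractName becomes reverse/dropWhile,
-- and the IPP/OpenCL index scans become dropWhile/takeWhile (objective: alternative, not faster).

-- ===== PORT A =====

-- inner 'while pos >= 0' scan of A.dropParams: p is pos+1 (so p = 0 is loop exit), depth as in A
def findOpenA (s : List Char) : Nat → Int → Option Nat
  | 0, _ => none
  | p + 1, depth =>
    let c := s.getD p ' '
    if c == ')' then findOpenA s p (depth + 1)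
    else if c == '(' then
      if depth - 1 == 0 then some p else findOpenA s p (depth - 1)
    else findOpenA s p depth

-- termination fact cited by dropParamsA's decreasing_by
theorem findOpenA_lt {s : List Char} : ∀ {p : Nat} {d : Int} {pos : Nat},
    findOpenA s p d = some pos → pos < p := by
  intro p
  induction p with
  | zero => intro d pos h; simp [findOpenA] at h
  | succ q ih =>
    intro d pos h
    simp only [findOpenA] at h
    split at h
    · exact Nat.lt_succ_of_lt (ih h)
    · split at h
      · split at h
        · simp at h; omega
        · exact Nat.lt_succ_of_lt (ih h)
      · exact Nat.lt_succ_of_lt (ih h)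

theorem slice_succ_neg_one (xs : List Char) (k : Nat) :
    PySem.List.slice xs (some ((k : Int))) (some (-1)) = xs.dropLast.drop k := by
  have hknn : ¬((k : Int) < 0) := by omega
  rcases eq_or_ne xs [] with h | h
  · simp [h, PySem.List.slice, PySem.List.clampIdx]
  · have hl : 0 < xs.length := List.length_pos_iff.mpr h
    by_cases hk : k ≤ xs.length
    · simp [PySem.List.slice, PySem.List.clampIdx, h, List.dropLast_eq_take, List.drop_take,
        Nat.min_eq_left hk, hknn]
      congr 1
      omega
    · have h1 : xs.drop k = [] := List.drop_eq_nil_of_le (by omega)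
      simp [PySem.List.slice, PySem.List.clampIdx, h, List.dropLast_eq_take, List.drop_take,
        Nat.min_eq_right (by omega : xs.length ≤ k), h1, hknn]

def dropParamsA (s : List Char) : List Char × List Char :=
  match hfo : findOpenA s s.length 0 with
  | none => (s, [])
  | some pos =>
    if pos == 0 || ['#', ':'].contains (s.getD (pos - 1) ' ') then
      let res := dropParamsA (PySem.List.slice s (some ((pos + 1 : Nat) : Int)) (some (-1)))
      (PySem.List.slice s none (some ((pos : Nat) : Int)) ++ res.1, res.2)
    else (PySem.List.slice s none (some ((pos : Nat) : Int)),
          PySem.List.slice s (some ((pos : Nat) : Int)) none)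
termination_by s.length
decreasing_by
  have hp := findOpenA_lt hfo
  rw [slice_succ_neg_one]
  simp only [List.length_drop, List.length_dropLast]
  omega

def extractNameA (s : List Char) : Nat → Bool → List Char
  | 0, _ => s
  | p + 1, inName =>
    let c := s.getD p ' '
    if c == ' ' then
      if inName then PySem.List.slice s (some ((p + 1 : Nat) : Int)) none
      else extractNameA s p inName
    else if PySem.Chars.isalnum c then extractNameA s p true
    else extractNameA s p inName

def scanBeginA (s : List Char) (b : Nat) : Nat :=
  if b < s.length then
    let c := s.getD b ' '
    if PySem.Chars.isalnum c || ['_', ':'].contains c then b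
    else scanBeginA s (b + 1)
  else b
termination_by s.length - b

def scanEndA (s : List Char) (e : Nat) : Nat :=
  if e < s.length then
    let c := s.getD e ' '
    if !(PySem.Chars.isalnum c || ['_', ':'].contains c) then e
    else scanEndA s (e + 1)
  else e
termination_by s.length - e

def getCXXFunctionName (spec : String) : String :=
  let s := spec.toList
  if PySem.Chars.startswith s "IPP".toList || PySem.Chars.startswith s "OpenCL".toList then
    let prefixSize := if PySem.Chars.startswith s "IPP".toList then "IPP".toList.length
      else "OpenCL".toList.length
    let pp : List Char × Nat :=
      if prefixSize < s.length && ['#', ':'].contains (s.getD prefixSize ' ') then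
        (PySem.List.slice s none (some ((prefixSize : Nat) : Int)) ++ [s.getD prefixSize ' '],
         prefixSize + 1)
      else (PySem.List.slice s none (some ((prefixSize : Nat) : Int)), prefixSize)
    let b := scanBeginA s pp.2
    if b == s.length then String.ofList s
    else
      let e := scanEndA s b
      String.ofList (pp.1 ++ PySem.List.slice s (some ((b : Nat) : Int)) (some ((e : Nat) : Int)))
  else
    let s2 := PySem.Chars.replace s ") const".toList ")".toList
    let rp := dropParamsA s2
    let name := extractNameA rp.1 rp.1.length false
    if PySem.Chars.isIn "operator".toList name then String.ofList (name ++ rp.2)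
    else if PySem.Chars.startswith name ['&'] then
      String.ofList (PySem.List.slice name (some 1) none)
    else String.ofList name

-- ===== PORT B =====

-- B.findOpen: forward pass with running balance 'bal' and running index i;
-- records the last '(' whose prefix balance equals the precomputed total balance
def findOpenFoldB (total : Int) : List Char → Nat → Int → Option Nat → Option Nat
  | [], _, _, best => best
  | c :: rest, i, bal, best =>
    if c == '(' then
      findOpenFoldB total rest (i + 1) (bal + 1) (if bal == total then some i else best)
    else if c == ')' then findOpenFoldB total rest (i + 1) (bal - 1) best
    else findOpenFoldB total rest (i + 1) bal best

def findOpenB (s : List Char) : Option Nat :=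
  findOpenFoldB ((s.count '(' : Int) - (s.count ')' : Int)) s 0 0 none

-- termination fact cited by dropParamsB's decreasing_by
theorem findOpenB_ne_nil {s : List Char} {pos : Nat} (h : findOpenB s = some pos) : s ≠ [] := by
  intro hnil
  subst hnil
  simp [findOpenB, findOpenFoldB] at h

-- B.dropParams: iterative peeling with a prefix accumulator
def dropParamsB (acc s : List Char) : List Char × List Char :=
  match hfo : findOpenB s with
  | none => (acc ++ s, [])
  | some pos =>
    if pos == 0 || (s.getD (pos - 1) ' ' == '#' || s.getD (pos - 1) ' ' == ':') then
      dropParamsB (acc ++ s.take pos) (s.dropLast.drop (pos + 1))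
    else (acc ++ s.take pos, s.drop pos)
termination_by s.length
decreasing_by
  have hne := findOpenB_ne_nil hfo
  have hl : 0 < s.length := List.length_pos_iff.mpr hne
  simp only [List.length_drop, List.length_dropLast]
  omega

-- B.extractName: reverse, strip non-alphanumerics, then cut at the next space
def extractNameB (s : List Char) : List Char :=
  let t := s.reverse.dropWhile (fun c => !PySem.Chars.isalnum c)
  if t.isEmpty then s
  else s.drop ((t.dropWhile (fun c => c != ' ')).length)

def isidentB (c : Char) : Bool := PySem.Chars.isalnum c || (c == '_' || c == ':')

def getCXXFunctionName_alt (spec : String) : String :=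
  let s := spec.toList
  if PySem.Chars.startswith s "IPP".toList || PySem.Chars.startswith s "OpenCL".toList then
    let n0 := if PySem.Chars.startswith s "IPP".toList then 3 else 6
    let h := (s.drop n0).take 1
    let n := if h == ['#'] || h == [':'] then n0 + 1 else n0
    let t := (s.drop n).dropWhile (fun c => !isidentB c)
    if t.isEmpty then String.ofList s
    else String.ofList (s.take n ++ t.takeWhile isidentB)
  else
    let s2 := PySem.Chars.replace s ") const".toList ")".toList
    let rp := dropParamsB [] s2
    let name := extractNameB rp.1
    if PySem.Chars.isIn "operator".toList name then String.ofList (name ++ rp.2)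
    else if name.take 1 == ['&'] then String.ofList (name.drop 1)
    else String.ofList name

-- ===== PRECONDITION & SPEC =====
def Spec_getCXXFunctionName (spec : String) (out : String) : Prop := out = getCXXFunctionName_alt spec
instance (spec : String) (out : String) : Decidable (Spec_getCXXFunctionName spec out) := by unfold Spec_getCXXFunctionName; infer_instance

-- ===== CLAIM (what is proved, stated in full; the proofs are below) =====
def Claim_equal_getCXXFunctionName : Prop := ∀ (spec : String), Dom_getCXXFunctionName spec → Spec_getCXXFunctionName spec (getCXXFunctionName spec)

-- ===== LEMMAS AND PROOFS =====

-- proof-side right-to-left scan: mediates between A's index countdown and B's forward fold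
def scanOpenG : List Char → Nat → Int → Option Nat
  | [], _, _ => none
  | c :: rest, pos, depth =>
    let p := pos - 1
    if c == ')' then scanOpenG rest p (depth + 1)
    else if c == '(' then
      if depth - 1 == 0 then some p else scanOpenG rest p (depth - 1)
    else scanOpenG rest p depth

theorem contains_pair (c a b : Char) : ([a, b].contains c) = (c == a || c == b) := by
  show (c == a || (c == b || false)) = _
  simp

theorem findOpen_AG (s : List Char) : ∀ (p : Nat) (d : Int), p ≤ s.length →
    scanOpenG ((s.take p).reverse) p d = findOpenA s p d := by
  intro p
  induction p with
  | zero => intro d _; simp [scanOpenG, findOpenA]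
  | succ q ih =>
    intro d hle
    have hq : q < s.length := by omega
    have htake : (s.take (q + 1)).reverse = s[q] :: (s.take q).reverse := by
      rw [List.take_add_one]
      simp [List.getElem?_eq_getElem hq]
    have hgetD : s.getD q ' ' = s[q] := List.getD_eq_getElem s ' ' hq
    rw [htake]
    simp only [scanOpenG, findOpenA, hgetD, Nat.add_sub_cancel]
    split
    · exact ih _ (by omega)
    · split
      · split
        · rfl
        · exact ih _ (by omega)
      · exact ih _ (by omega)

theorem scanOpenG_append (l1 l2 : List Char) : ∀ (m : Nat) (d : Int),
    scanOpenG (l1 ++ l2) (m + l1.length) d =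
      match scanOpenG l1 (m + l1.length) d with
      | some q => some q
      | none => scanOpenG l2 m (d + ((l1.count ')' : Int) - (l1.count '(' : Int))) := by
  induction l1 with
  | nil => intro m d; simp [scanOpenG]
  | cons c t ih =>
    intro m d
    simp only [List.cons_append, scanOpenG, List.length_cons]
    have harith : m + (t.length + 1) - 1 = m + t.length := by omega
    rw [harith]
    by_cases hc : c = ')'
    · subst hc
      simp only [List.count_cons]
      have h1 : (')' == ')') = true := by decide
      have h2 : (')' == '(') = false := by decide
      simp only [h1, if_true, h2, ih]
      have : d + 1 + ((t.count ')' : Int) - (t.count '(' : Int)) =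
          d + (((t.count ')' + 1 : Nat) : Int) - ((t.count '(' + 0 : Nat) : Int)) := by
        push_cast; ring
      rw [this]
      simp
    · by_cases hc2 : c = '('
      · subst hc2
        have h1 : ('(' == ')') = false := by decide
        have h2 : ('(' == '(') = true := by decide
        simp only [h1, Bool.false_eq_true, if_false, h2, if_true]
        by_cases hd : (d - 1 == 0) = true
        · simp [hd]
        · simp only [Bool.eq_false_iff.mpr hd, Bool.false_eq_true, if_false, ih,
            List.count_cons]
          have : d - 1 + ((t.count ')' : Int) - (t.count '(' : Int)) =
              d + (((t.count ')' + 0 : Nat) : Int) - ((t.count '(' + 1 : Nat) : Int)) := by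
            push_cast; ring
          rw [this]
          simp
      · have h1 : (c == ')') = false := by simp [hc]
        have h2 : (c == '(') = false := by simp [hc2]
        simp only [h1, Bool.false_eq_true, if_false, h2, ih, List.count_cons]
        have : d + ((t.count ')' : Int) - (t.count '(' : Int)) =
            d + (((t.count ')' + 0 : Nat) : Int) - ((t.count '(' + 0 : Nat) : Int)) := by
          push_cast; ring
        rw [this]

theorem foldB_eq_scanG : ∀ (v : List Char) (k : Nat) (bal total : Int) (best : Option Nat),
    total = bal + ((v.count '(' : Int) - (v.count ')' : Int)) →
    findOpenFoldB total v k bal best =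
      match scanOpenG v.reverse (k + v.length) 0 with
      | some q => some q
      | none => best := by
  intro v
  induction v with
  | nil => intro k bal total best _; simp [findOpenFoldB, scanOpenG]
  | cons c w ih =>
    intro k bal total best hinv
    have hrev : (c :: w).reverse = w.reverse ++ [c] := by simp
    have hlen : k + (c :: w).length = (k + 1) + w.reverse.length := by simp; omega
    rw [hrev, hlen, scanOpenG_append]
    simp only [List.length_reverse]
    simp only [findOpenFoldB]
    by_cases hc : c = '('
    · subst hc
      have h2 : ('(' == '(') = true := by decide
      simp only [h2, if_true]
      have hinv' : total = (bal + 1) + ((w.count '(' : Int) - (w.count ')' : Int)) := by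
        rw [hinv, List.count_cons_self, List.count_cons_of_ne (by decide : ('(' : Char) ≠ ')')]
        push_cast; ring
      rw [ih (k + 1) (bal + 1) total _ hinv']
      cases hsc : scanOpenG w.reverse (k + 1 + w.length) 0 with
      | some q => simp
      | none =>
        have h1 : ('(' == ')') = false := by decide
        simp only [scanOpenG, h1, Bool.false_eq_true, if_false, h2, if_true,
          List.count_reverse, Nat.add_sub_cancel]
        by_cases hb : bal = total
        · have hd : ((w.count ')' : Int) - (w.count '(' : Int) - 1 = 0) := by omega
          simp [hb, hd]
        · have hd : ¬((w.count ')' : Int) - (w.count '(' : Int) - 1 = 0) := by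
            intro h; exact hb (by omega)
          simp [hb, hd]
    · by_cases hc2 : c = ')'
      · subst hc2
        have h1 : (')' == '(') = false := by decide
        have h2 : (')' == ')') = true := by decide
        simp only [h1, Bool.false_eq_true, if_false, h2, if_true]
        have hinv' : total = (bal - 1) + ((w.count '(' : Int) - (w.count ')' : Int)) := by
          rw [hinv, List.count_cons_of_ne (by decide : (')' : Char) ≠ '('), List.count_cons_self]
          push_cast; ring
        rw [ih (k + 1) (bal - 1) total _ hinv']
        cases hsc : scanOpenG w.reverse (k + 1 + w.length) 0 with
        | some q => simp
        | none => simp [scanOpenG]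
      · have h1 : (c == '(') = false := by simp [hc]
        have h2 : (c == ')') = false := by simp [hc2]
        simp only [h1, Bool.false_eq_true, if_false, h2]
        have hinv' : total = bal + ((w.count '(' : Int) - (w.count ')' : Int)) := by
          rw [hinv, List.count_cons_of_ne hc, List.count_cons_of_ne hc2]
        rw [ih (k + 1) bal total _ hinv']
        cases hsc : scanOpenG w.reverse (k + 1 + w.length) 0 with
        | some q => simp
        | none => simp [scanOpenG, h1, h2]

theorem findOpenB_eq_A (s : List Char) : findOpenB s = findOpenA s s.length 0 := by
  unfold findOpenB
  rw [foldB_eq_scanG s 0 0 _ none (by ring)]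
  rw [show (0 + s.length = s.length) by omega]
  rw [← findOpen_AG s s.length 0 le_rfl, List.take_length]
  cases scanOpenG s.reverse s.length 0 <;> rfl

theorem dpA_none {s : List Char} (h : findOpenA s s.length 0 = none) :
    dropParamsA s = (s, []) := by
  rw [dropParamsA.eq_def]
  split
  · rfl
  · rename_i pos hfo; rw [h] at hfo; cases hfo

theorem dpA_some {s : List Char} {pos : Nat} (h : findOpenA s s.length 0 = some pos) :
    dropParamsA s =
      if pos == 0 || ['#', ':'].contains (s.getD (pos - 1) ' ') then
        (PySem.List.slice s none (some ((pos : Nat) : Int)) ++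
            (dropParamsA (PySem.List.slice s (some ((pos + 1 : Nat) : Int)) (some (-1)))).1,
         (dropParamsA (PySem.List.slice s (some ((pos + 1 : Nat) : Int)) (some (-1)))).2)
      else (PySem.List.slice s none (some ((pos : Nat) : Int)),
            PySem.List.slice s (some ((pos : Nat) : Int)) none) := by
  rw [dropParamsA.eq_def]
  split
  · rename_i hfo; rw [h] at hfo; cases hfo
  · rename_i pos' hfo
    rw [h] at hfo
    obtain rfl : pos' = pos := (Option.some_inj.mp hfo).symm
    rfl

theorem dpB_none {s : List Char} (acc : List Char) (h : findOpenB s = none) :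
    dropParamsB acc s = (acc ++ s, []) := by
  rw [dropParamsB.eq_def]
  split
  · rfl
  · rename_i pos hfo; rw [h] at hfo; cases hfo

theorem dpB_some {s : List Char} {pos : Nat} (acc : List Char) (h : findOpenB s = some pos) :
    dropParamsB acc s =
      if pos == 0 || (s.getD (pos - 1) ' ' == '#' || s.getD (pos - 1) ' ' == ':') then
        dropParamsB (acc ++ s.take pos) (s.dropLast.drop (pos + 1))
      else (acc ++ s.take pos, s.drop pos) := by
  rw [dropParamsB.eq_def]
  split
  · rename_i hfo; rw [h] at hfo; cases hfo
  · rename_i pos' hfo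
    rw [h] at hfo
    obtain rfl : pos' = pos := (Option.some_inj.mp hfo).symm
    rfl

theorem dropParams_AB : ∀ (n : Nat) (s : List Char), s.length ≤ n → ∀ (acc : List Char),
    dropParamsB acc s = (acc ++ (dropParamsA s).1, (dropParamsA s).2) := by
  intro n
  induction n with
  | zero =>
    intro s hs acc
    have hnil : s = [] := List.eq_nil_of_length_eq_zero (by omega)
    subst hnil
    have h : findOpenA ([] : List Char) ([] : List Char).length 0 = none := by
      simp [findOpenA]
    rw [dpB_none acc (by rfl), dpA_none h]
  | succ m ih =>
    intro s hs acc
    have hAB : findOpenB s = findOpenA s s.length 0 := findOpenB_eq_A s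
    cases hfo : findOpenA s s.length 0 with
    | none => rw [dpB_none acc (hAB.trans hfo), dpA_none hfo]
    | some pos =>
      have hp : pos < s.length := findOpenA_lt hfo
      rw [dpB_some acc (hAB.trans hfo), dpA_some hfo, contains_pair]
      rw [slice_succ_neg_one, PySem.List.slice_to_natCast, PySem.List.slice_from_natCast]
      split
      · have hlen : (s.dropLast.drop (pos + 1)).length ≤ m := by
          simp only [List.length_drop, List.length_dropLast]
          omega
        rw [ih _ hlen]
        simp [List.append_assoc]
      · simp

set_option maxRecDepth 4096 in
theorem extractName_true (s : List Char) : ∀ (p : Nat), p ≤ s.length →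
    extractNameA s p true = s.drop (((s.take p).reverse.dropWhile (fun c => c != ' ')).length) := by
  intro p
  induction p with
  | zero => simp [extractNameA]
  | succ q ih =>
    intro hle
    have hq : q < s.length := by omega
    have htake : (s.take (q + 1)).reverse = s[q] :: (s.take q).reverse := by
      rw [List.take_add_one]
      simp [List.getElem?_eq_getElem hq]
    have hgetD : s.getD q ' ' = s[q] := List.getD_eq_getElem s ' ' hq
    rw [htake]
    simp only [extractNameA, hgetD]
    by_cases hsp : s[q] = ' '
    · have h1 : (s[q] == ' ') = true := by simp [hsp]
      have h2 : (s[q] != ' ') = false := by simp [hsp]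
      simp only [h1, if_true, List.dropWhile_cons, h2, Bool.false_eq_true, if_false]
      rw [PySem.List.slice_from_natCast]
      simp only [List.length_cons, List.length_reverse, List.length_take,
        Nat.min_eq_left (le_of_lt hq)]
    · have hne : (s[q] != ' ') = true := by simp [hsp]
      have hbe : (s[q] == ' ') = false := by simp [hsp]
      rw [List.dropWhile_cons]
      simp only [hne, hbe, Bool.false_eq_true, if_false, if_true]
      by_cases hal : PySem.Chars.isalnum s[q] = true
      · rw [if_pos hal]; exact ih (by omega)
      · rw [if_neg hal]; exact ih (by omega)

theorem extractName_false (s : List Char) : ∀ (p : Nat), p ≤ s.length →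
    extractNameA s p false =
      if ((s.take p).reverse.dropWhile (fun c => !PySem.Chars.isalnum c)).isEmpty then s
      else s.drop ((((s.take p).reverse.dropWhile (fun c => !PySem.Chars.isalnum c)).dropWhile
        (fun c => c != ' ')).length) := by
  intro p
  induction p with
  | zero => simp [extractNameA]
  | succ q ih =>
    intro hle
    have hq : q < s.length := by omega
    have htake : (s.take (q + 1)).reverse = s[q] :: (s.take q).reverse := by
      rw [List.take_add_one]
      simp [List.getElem?_eq_getElem hq]
    have hgetD : s.getD q ' ' = s[q] := List.getD_eq_getElem s ' ' hq
    rw [htake]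
    simp only [extractNameA, hgetD]
    by_cases hsp : s[q] = ' '
    · have hal : PySem.Chars.isalnum ' ' = false := by decide
      simp [hsp, hal, ih (by omega)]
    · by_cases hal : PySem.Chars.isalnum s[q] = true
      · have hne : (s[q] != ' ') = true := by simp [hsp]
        simp [hsp, hal, hne, extractName_true s q (by omega)]
      · have hal' : PySem.Chars.isalnum s[q] = false := by simpa using hal
        simp [hsp, hal', ih (by omega)]

theorem extractName_AB (s : List Char) : extractNameB s = extractNameA s s.length false := by
  rw [extractName_false s s.length le_rfl, List.take_length]
  rfl

theorem scanBegin_drop (s : List Char) : ∀ (k b : Nat), s.length - b ≤ k →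
    (s.drop b).dropWhile (fun c => !isidentB c) = s.drop (scanBeginA s b) := by
  intro k
  induction k with
  | zero =>
    intro b hb
    have hbe : s.length ≤ b := by omega
    rw [scanBeginA.eq_def]
    simp [List.drop_eq_nil_of_le hbe, Nat.not_lt.mpr hbe]
  | succ m ih =>
    intro b hb
    rw [scanBeginA.eq_def]
    by_cases hlt : b < s.length
    · have hgetD : s.getD b ' ' = s[b] := List.getD_eq_getElem s ' ' hlt
      conv_lhs => rw [List.drop_eq_getElem_cons hlt]
      simp only [if_pos hlt, hgetD, List.dropWhile_cons]
      rw [contains_pair]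
      by_cases hid : (PySem.Chars.isalnum s[b] || (s[b] == '_' || s[b] == ':')) = true
      · have hq : (!isidentB s[b]) = false := by simp [isidentB, hid]
        simp only [hid, if_true, hq, Bool.false_eq_true, if_false]
        exact (List.drop_eq_getElem_cons hlt).symm
      · have hq : (!isidentB s[b]) = true := by
          simp only [isidentB]
          simp [Bool.eq_false_iff.mpr hid]
        simp only [Bool.eq_false_iff.mpr hid, Bool.false_eq_true, if_false, hq, if_true]
        exact ih (b + 1) (by omega)
    · rw [if_neg hlt]
      simp [List.drop_eq_nil_of_le (by omega : s.length ≤ b)]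

theorem scanBegin_le (s : List Char) : ∀ (k b : Nat), s.length - b ≤ k → b ≤ s.length →
    scanBeginA s b ≤ s.length := by
  intro k
  induction k with
  | zero =>
    intro b hb hble
    rw [scanBeginA.eq_def]
    have : ¬ b < s.length := by omega
    rw [if_neg this]
    omega
  | succ m ih =>
    intro b hb hble
    rw [scanBeginA.eq_def]
    by_cases hlt : b < s.length
    · rw [if_pos hlt]
      simp only [contains_pair]
      by_cases hid : (PySem.Chars.isalnum (s.getD b ' ') || (s.getD b ' ' == '_' || s.getD b ' ' == ':')) = true
      · simp only [hid, if_true]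
        omega
      · simp only [Bool.eq_false_iff.mpr hid, Bool.false_eq_true, if_false]
        exact ih (b + 1) (by omega) (by omega)
    · rw [if_neg hlt]; omega

theorem scanEnd_ge (s : List Char) : ∀ (k b : Nat), s.length - b ≤ k → b ≤ scanEndA s b := by
  intro k
  induction k with
  | zero =>
    intro b hb
    rw [scanEndA.eq_def]
    have : ¬ b < s.length := by omega
    rw [if_neg this]
  | succ m ih =>
    intro b hb
    rw [scanEndA.eq_def]
    by_cases hlt : b < s.length
    · rw [if_pos hlt]
      simp only [contains_pair]
      by_cases hid : (!(PySem.Chars.isalnum (s.getD b ' ') || (s.getD b ' ' == '_' || s.getD b ' ' == ':'))) = true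
      · simp only [hid, if_true]
        omega
      · simp only [Bool.eq_false_iff.mpr hid, Bool.false_eq_true, if_false]
        have := ih (b + 1) (by omega)
        omega
    · rw [if_neg hlt]

theorem scanEnd_take (s : List Char) : ∀ (k b : Nat), s.length - b ≤ k →
    (s.drop b).takeWhile isidentB = (s.drop b).take (scanEndA s b - b) := by
  intro k
  induction k with
  | zero =>
    intro b hb
    have hbe : s.length ≤ b := by omega
    simp [List.drop_eq_nil_of_le hbe]
  | succ m ih =>
    intro b hb
    rw [scanEndA.eq_def]
    by_cases hlt : b < s.length
    · have hgetD : s.getD b ' ' = s[b] := List.getD_eq_getElem s ' ' hlt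
      conv_lhs => rw [List.drop_eq_getElem_cons hlt]
      conv_rhs => rw [List.drop_eq_getElem_cons hlt]
      simp only [if_pos hlt, hgetD, List.takeWhile_cons, contains_pair]
      by_cases hid : (PySem.Chars.isalnum s[b] || (s[b] == '_' || s[b] == ':')) = true
      · have hq : isidentB s[b] = true := by simp [isidentB, hid]
        have hnb : (!(PySem.Chars.isalnum s[b] || (s[b] == '_' || s[b] == ':'))) = false := by
          simp [hid]
        have hge : b + 1 ≤ scanEndA s (b + 1) := scanEnd_ge s (s.length - (b + 1)) (b + 1) le_rfl
        simp only [hq, if_true, hnb, Bool.false_eq_true, if_false]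
        have harith : scanEndA s (b + 1) - b = (scanEndA s (b + 1) - (b + 1)) + 1 := by omega
        rw [harith, List.take_succ_cons]
        rw [ih (b + 1) (by omega)]
      · have hq : isidentB s[b] = false := by
          simp only [isidentB]
          exact Bool.eq_false_iff.mpr hid
        have hnb : (!(PySem.Chars.isalnum s[b] || (s[b] == '_' || s[b] == ':'))) = true := by
          simp [Bool.eq_false_iff.mpr hid]
        simp only [hq, Bool.false_eq_true, if_false, hnb, if_true, Nat.sub_self, List.take_zero]
    · simp [List.drop_eq_nil_of_le (by omega : s.length ≤ b)]

theorem ipp_core (s : List Char) (n : Nat) (hn : n ≤ s.length) (pre : List Char) :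
    (let b := scanBeginA s n
     if b == s.length then String.ofList s
     else String.ofList (pre ++ PySem.List.slice s (some ((b : Nat) : Int))
       (some ((scanEndA s b : Nat) : Int)))) =
    (let t := (s.drop n).dropWhile (fun c => !isidentB c)
     if t.isEmpty then String.ofList s
     else String.ofList (pre ++ t.takeWhile isidentB)) := by
  rw [scanBegin_drop s (s.length - n) n le_rfl]
  have hble : scanBeginA s n ≤ s.length := scanBegin_le s (s.length - n) n le_rfl hn
  by_cases he : scanBeginA s n = s.length
  · simp [he]
  · have hnee : (s.drop (scanBeginA s n)).isEmpty = false := by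
      rw [List.isEmpty_eq_false_iff, Ne, List.drop_eq_nil_iff]
      omega
    have hbeq : (scanBeginA s n == s.length) = false := by simp [he]
    simp only [hbeq, Bool.false_eq_true, if_false, hnee]
    rw [scanEnd_take s (s.length - scanBeginA s n) (scanBeginA s n) le_rfl,
      PySem.List.slice_natCast]

theorem take_one_eq_pair (s : List Char) (n0 : Nat) (a : Char) :
    ((s.drop n0).take 1 == [a]) = (decide (n0 < s.length) && (s.getD n0 ' ' == a)) := by
  by_cases hlt : n0 < s.length
  · have h1 : (s.drop n0).take 1 = [s[n0]] := by
      rw [List.drop_eq_getElem_cons hlt]; rfl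
    rw [h1, List.getD_eq_getElem s ' ' hlt]
    simp [hlt]
  · have h1 : s.drop n0 = [] := List.drop_eq_nil_of_le (by omega)
    rw [h1]
    simp [hlt]

theorem ipp_AB (s : List Char) (n0 : Nat) (hn0 : n0 ≤ s.length) :
    (let pp : List Char × Nat :=
      if n0 < s.length && ['#', ':'].contains (s.getD n0 ' ') then
        (PySem.List.slice s none (some ((n0 : Nat) : Int)) ++ [s.getD n0 ' '], n0 + 1)
      else (PySem.List.slice s none (some ((n0 : Nat) : Int)), n0)
     let b := scanBeginA s pp.2
     if b == s.length then String.ofList s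
     else String.ofList (pp.1 ++ PySem.List.slice s (some ((b : Nat) : Int))
       (some ((scanEndA s b : Nat) : Int)))) =
    (let h := (s.drop n0).take 1
     let n := if h == ['#'] || h == [':'] then n0 + 1 else n0
     let t := (s.drop n).dropWhile (fun c => !isidentB c)
     if t.isEmpty then String.ofList s
     else String.ofList (s.take n ++ t.takeWhile isidentB)) := by
  have hcond : (((s.drop n0).take 1 == ['#']) || ((s.drop n0).take 1 == [':'])) =
      (decide (n0 < s.length) && ['#', ':'].contains (s.getD n0 ' ')) := by
    rw [take_one_eq_pair, take_one_eq_pair, contains_pair]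
    cases h : decide (n0 < s.length) <;> simp
  simp only [hcond]
  by_cases hh : (decide (n0 < s.length) && ['#', ':'].contains (s.getD n0 ' ')) = true
  · have hlt : n0 < s.length := by
      rcases Bool.and_eq_true_iff.mp hh with ⟨h1, _⟩
      exact of_decide_eq_true h1
    have hpre : PySem.List.slice s none (some ((n0 : Nat) : Int)) ++ [s.getD n0 ' '] =
        s.take (n0 + 1) := by
      rw [PySem.List.slice_to_natCast]
      rw [List.take_add_one, List.getD_eq_getElem s ' ' hlt]
      simp [List.getElem?_eq_getElem hlt]
    simp only [hh, if_true]
    rw [hpre]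
    exact ipp_core s (n0 + 1) (by omega) _
  · simp only [Bool.eq_false_iff.mpr hh, Bool.false_eq_true, if_false,
      PySem.List.slice_to_natCast]
    exact ipp_core s n0 hn0 _

theorem amp_AB (name params : List Char) :
    (if PySem.Chars.isIn "operator".toList name then String.ofList (name ++ params)
     else if PySem.Chars.startswith name ['&'] then
       String.ofList (PySem.List.slice name (some 1) none)
     else String.ofList name) =
    (if PySem.Chars.isIn "operator".toList name then String.ofList (name ++ params)
     else if name.take 1 == ['&'] then String.ofList (name.drop 1)
     else String.ofList name) := by
  by_cases hop : PySem.Chars.isIn "operator".toList name = true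
  · rw [if_pos hop, if_pos hop]
  · rw [if_neg hop, if_neg hop]
    have hsw : PySem.Chars.startswith name ['&'] = (name.take 1 == ['&']) := by
      by_cases hp : ['&'] <+: name
      · have h1 : PySem.Chars.startswith name ['&'] = true :=
          (PySem.Chars.startswith_iff _ _).mpr hp
        rcases hp with ⟨t, ht⟩
        rw [h1, ← ht]
        simp
      · have h1 : PySem.Chars.startswith name ['&'] = false := by
          rw [Bool.eq_false_iff]
          intro hx
          exact hp ((PySem.Chars.startswith_iff _ _).mp hx)
        rw [h1]
        symm
        rw [Bool.eq_false_iff]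
        intro hx
        apply hp
        rw [← (beq_iff_eq.mp hx)]
        exact List.take_prefix 1 name
    rw [hsw]
    by_cases ha : (name.take 1 == ['&']) = true
    · simp only [ha, if_true]
      have : PySem.List.slice name (some 1) none = name.drop 1 := by
        rw [show ((1 : Int) = ((1 : Nat) : Int)) from rfl, PySem.List.slice_from_natCast]
      rw [this]
    · simp [Bool.eq_false_iff.mpr ha]

-- ===== VERDICT (by name: the statement is the Claim_ definition above) =====
theorem getCXXFunctionName_spec : Claim_equal_getCXXFunctionName := by
  unfold Claim_equal_getCXXFunctionName
  intro spec _
  unfold Spec_getCXXFunctionName getCXXFunctionName getCXXFunctionName_alt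
  by_cases hipp : (PySem.Chars.startswith spec.toList "IPP".toList
      || PySem.Chars.startswith spec.toList "OpenCL".toList) = true
  · simp only [hipp, if_true]
    have hn0 : (if PySem.Chars.startswith spec.toList "IPP".toList = true then "IPP".toList.length
        else "OpenCL".toList.length) ≤ spec.toList.length := by
      by_cases hi : PySem.Chars.startswith spec.toList "IPP".toList = true
      · rw [if_pos hi]
        have hp := (PySem.Chars.startswith_iff _ _).mp hi
        simpa using hp.length_le
      · rw [if_neg hi]
        have ho : PySem.Chars.startswith spec.toList "OpenCL".toList = true := by
          rcases Bool.or_eq_true_iff.mp hipp with h | h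
          · exact absurd h hi
          · exact h
        have hp := (PySem.Chars.startswith_iff _ _).mp ho
        simpa using hp.length_le
    have := ipp_AB spec.toList _ hn0
    simpa using this
  · simp only [Bool.eq_false_iff.mpr hipp, Bool.false_eq_true, if_false]
    rw [dropParams_AB (PySem.Chars.replace spec.toList ") const".toList ")".toList).length _
      le_rfl []]
    simp only [List.nil_append]
    rw [extractName_AB, amp_AB]
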